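-- pv_equiv track=rewrite | github.com/xpunch/leetcode | 0052.n-queens-ii/52.n-queens-ii.py | getAvailablePositions
-- ===== SOURCE A (Python) =====
-- from typing import List
--
-- def getAvailablePositions(n: int, queens: List[int]) -> List[int]:
--     row = len(queens)
--     result = [i for i in range(n)]
--     for i in range(row):
--         queen = queens[i]
--         gap = abs(row-i)
--         if result.__contains__(queen):
--             result.remove(queen)
--         if queen - gap >= 0 and result.__contains__(queen-gap):
--             result.remove(queen-gap)
--         if queen+gap < n and result.__contains__(queen+gap):
--             result.remove(queen+gap)
--     return result
-- ===== SOURCE B (Python) =====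
-- def getAvailablePositions(n, queens):
--     row = len(queens)
--     return [c for c in range(n)
--             if all(c != q and abs(c - q) != row - i for i, q in enumerate(queens))]
-- ===== Notes on version B (the rewrite author's own statement) =====
-- stated objective: idiomatic
-- what changed: Instead of materialising all columns and removing the up-to-three attacked columns per queen with list.remove, B filters range(n) by testing each candidate column against every placed queen with a single conflict predicate.
import Mathlib
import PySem

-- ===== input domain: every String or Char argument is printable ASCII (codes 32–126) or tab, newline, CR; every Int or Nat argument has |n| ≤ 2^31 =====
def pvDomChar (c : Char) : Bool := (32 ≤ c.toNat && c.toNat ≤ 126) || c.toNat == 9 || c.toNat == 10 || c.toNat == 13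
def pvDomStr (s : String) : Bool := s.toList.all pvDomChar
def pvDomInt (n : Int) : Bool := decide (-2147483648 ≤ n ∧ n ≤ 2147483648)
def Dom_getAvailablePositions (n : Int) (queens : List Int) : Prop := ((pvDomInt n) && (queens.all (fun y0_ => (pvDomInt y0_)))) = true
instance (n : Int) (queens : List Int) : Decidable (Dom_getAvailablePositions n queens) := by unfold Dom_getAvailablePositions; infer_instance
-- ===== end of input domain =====

-- B replaces A's "build all columns, then remove the attacked columns per queen" with a
-- per-column conflict test against every queen (idiomatic filter; same cost).

-- ===== PORT A =====
-- loop body of A: remove queen, queen-gap, queen+gap from result (each guarded as in A)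
def aStep (n row : Int) (result : List Int) (iq : Int × Int) : List Int :=
  let i := iq.1
  let queen := iq.2
  let gap := |row - i|
  let r1 := if result.contains queen then (PySem.List.remove? result queen).getD result else result
  let r2 := if queen - gap ≥ 0 ∧ r1.contains (queen - gap) then
              (PySem.List.remove? r1 (queen - gap)).getD r1 else r1
  if queen + gap < n ∧ r2.contains (queen + gap) then
    (PySem.List.remove? r2 (queen + gap)).getD r2 else r2

def getAvailablePositions (n : Int) (queens : List Int) : List Int :=
  let row : Int := queens.length
  let result := PySem.List.pyRange 0 n 1
  (PySem.List.enumerate queens 0).foldl (aStep n row) result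

-- ===== PORT B =====
def getAvailablePositions_alt (n : Int) (queens : List Int) : List Int :=
  let row : Int := queens.length
  (PySem.List.pyRange 0 n 1).filter (fun c =>
    (PySem.List.enumerate queens 0).all (fun iq => decide (c ≠ iq.2 ∧ |c - iq.2| ≠ row - iq.1)))

-- ===== PRECONDITION & SPEC =====
def Spec_getAvailablePositions (n : Int) (queens : List Int) (out : List Int) : Prop := out = getAvailablePositions_alt n queens
instance (n : Int) (queens : List Int) (out : List Int) : Decidable (Spec_getAvailablePositions n queens out) := by unfold Spec_getAvailablePositions; infer_instance

-- ===== CLAIM (what is proved, stated in full; the proofs are below) =====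
def Claim_equal_getAvailablePositions : Prop := ∀ (n : Int) (queens : List Int), Dom_getAvailablePositions n queens → Spec_getAvailablePositions n queens (getAvailablePositions n queens)

-- ===== LEMMAS AND PROOFS =====

-- unguarded remove-if-present = filter, on a duplicate-free list
lemma removeIf_eq_filter (l : List Int) (v : Int) (h : l.Nodup) :
    (if l.contains v then (PySem.List.remove? l v).getD l else l)
      = l.filter (fun c => c != v) := by
  by_cases hv : v ∈ l
  · rw [if_pos (by simpa using hv), PySem.List.remove?_eq_some_erase l v hv,
      Option.getD_some, h.erase_eq_filter v]
  · rw [if_neg (by simpa using hv)]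
    symm
    exact List.filter_eq_self.mpr fun c hc => by
      simp only [bne_iff_ne, ne_eq]; exact fun h' => hv (h' ▸ hc)

-- guarded remove = filter, when the guard failing implies the value is absent
lemma removeGuard_eq_filter (l : List Int) (v : Int) (hnd : l.Nodup)
    (P : Prop) [Decidable P] (hP : ¬ P → v ∉ l) :
    (if P ∧ l.contains v then (PySem.List.remove? l v).getD l else l)
      = l.filter (fun c => c != v) := by
  by_cases hv : v ∈ l
  · by_cases hP' : P
    · rw [if_pos ⟨hP', by simpa using hv⟩, PySem.List.remove?_eq_some_erase l v hv,
        Option.getD_some, hnd.erase_eq_filter v]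
    · exact absurd hv (hP hP')
  · rw [if_neg (fun h => hv (by simpa using h.2))]
    symm
    exact List.filter_eq_self.mpr fun c hc => by
      simp only [bne_iff_ne, ne_eq]; exact fun h' => hv (h' ▸ hc)

-- one iteration of A's loop = one conjunct of B's predicate, on a duplicate-free
-- list of in-range columns, for a positive gap
lemma aStep_eq_filter (n row i q : Int) (l : List Int) (hnd : l.Nodup)
    (hb : ∀ c ∈ l, 0 ≤ c ∧ c < n) (hgap : 0 < row - i) :
    aStep n row l (i, q) = l.filter (fun c => decide (c ≠ q ∧ |c - q| ≠ row - i)) := by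
  have hg : |row - i| = row - i := abs_of_pos hgap
  simp only [aStep, hg]
  rw [removeIf_eq_filter l q hnd]
  set l1 := l.filter (fun c => c != q) with hl1
  have hnd1 : l1.Nodup := hnd.filter _
  have hb1 : ∀ c ∈ l1, 0 ≤ c ∧ c < n := fun c hc => hb c (List.mem_of_mem_filter hc)
  rw [removeGuard_eq_filter l1 (q - (row - i)) hnd1 (q - (row - i) ≥ 0)
    (fun hge hmem => hge (hb1 _ hmem).1)]
  set l2 := l1.filter (fun c => c != (q - (row - i))) with hl2
  have hnd2 : l2.Nodup := hnd1.filter _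
  have hb2 : ∀ c ∈ l2, 0 ≤ c ∧ c < n := fun c hc => hb1 c (List.mem_of_mem_filter hc)
  rw [removeGuard_eq_filter l2 (q + (row - i)) hnd2 (q + (row - i) < n)
    (fun hlt hmem => hlt (hb2 _ hmem).2)]
  rw [hl2, hl1, List.filter_filter, List.filter_filter]
  refine List.filter_congr fun c _ => ?_
  rw [Bool.eq_iff_iff]
  simp only [Bool.and_eq_true, bne_iff_ne, decide_eq_true_eq, ne_eq]
  rcases abs_cases (c - q) with ⟨he, _⟩ | ⟨he, _⟩ <;> rw [he] <;> omega

-- the whole fold = filter by the conjunction of all per-queen conjuncts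
lemma fold_eq_filter (n row : Int) (qs : List Int) : ∀ (s : Int) (l : List Int),
    l.Nodup → (∀ c ∈ l, 0 ≤ c ∧ c < n) → s + qs.length ≤ row →
    (PySem.List.enumerate qs s).foldl (aStep n row) l
      = l.filter (fun c => (PySem.List.enumerate qs s).all
          (fun iq => decide (c ≠ iq.2 ∧ |c - iq.2| ≠ row - iq.1))) := by
  induction qs with
  | nil => intro s l _ _ _; simp [PySem.List.enumerate_nil]
  | cons q qs ih =>
    intro s l hnd hb hlen
    rw [PySem.List.enumerate_cons]
    simp only [List.foldl_cons, List.all_cons]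
    have hgap : 0 < row - s := by
      simp only [List.length_cons] at hlen; push_cast at hlen; omega
    rw [aStep_eq_filter n row s q l hnd hb hgap]
    rw [ih (s + 1) _ (hnd.filter _)
      (fun c hc => hb c (List.mem_of_mem_filter hc))
      (by simp only [List.length_cons] at hlen; push_cast at hlen ⊢; omega)]
    rw [List.filter_filter]
    exact List.filter_congr fun c _ => Bool.and_comm _ _

theorem getAvailablePositions_spec : Claim_equal_getAvailablePositions := by
  intro n queens _
  show getAvailablePositions n queens = getAvailablePositions_alt n queens
  unfold getAvailablePositions getAvailablePositions_alt
  exact fold_eq_filter n queens.length queens 0 (PySem.List.pyRange 0 n 1)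
    (PySem.List.nodup_pyRange_one 0 n)
    (fun c hc => by have := PySem.List.mem_pyRange_one.mp hc; omega)
    (by simp)
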